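-- pv_equiv track=rewrite | github.com/shi0524/algorithmbasic2020 | Python2/class26/Code01_SumOfSubarrayMinimums.py | leftNearLessEqual2
-- ===== SOURCE A (Python) =====
-- def leftNearLessEqual2(arr):
--     """ 获取左边离 i 最近小于等于 i 的数
--     """
--     n = len(arr)
--     left = [0] * n
--     for i in range(n):
--         ans = -1
--         for j in range(i - 1, -1, -1):
--             if arr[j] <= arr[i]:
--                 ans = j
--                 break
--         left[i] = ans
--     return left
-- ===== SOURCE B (Python) =====
-- def leftNearLessEqual2(arr):
--     """ 获取左边离 i 最近小于等于 i 的数 (monotonic stack, one pass) """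
--     left = []
--     stack = []  # (value, index), values weakly decreasing from the top downwards
--     for i, v in enumerate(arr):
--         while stack and stack[-1][0] > v:
--             stack.pop()
--         left.append(stack[-1][1] if stack else -1)
--         stack.append((v, i))
--     return left
-- ===== Notes on version B (the rewrite author's own statement) =====
-- stated objective: faster
-- what changed: Replaced the quadratic per-index backward scan with a single pass maintaining a monotonic stack of (value,index) pairs, so each element is pushed and popped at most once.
import Mathlib
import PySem

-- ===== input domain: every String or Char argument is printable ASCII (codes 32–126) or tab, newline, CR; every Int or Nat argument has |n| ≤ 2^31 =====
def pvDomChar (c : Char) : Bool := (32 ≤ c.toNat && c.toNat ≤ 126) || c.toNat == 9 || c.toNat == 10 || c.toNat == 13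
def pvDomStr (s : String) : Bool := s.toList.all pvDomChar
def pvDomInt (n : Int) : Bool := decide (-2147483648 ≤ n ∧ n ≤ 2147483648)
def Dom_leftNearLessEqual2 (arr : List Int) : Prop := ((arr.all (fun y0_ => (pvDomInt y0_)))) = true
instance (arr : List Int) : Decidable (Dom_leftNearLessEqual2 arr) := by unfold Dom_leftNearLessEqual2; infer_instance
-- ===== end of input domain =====

-- B replaces A's quadratic per-index backward scan by a one-pass monotonic stack (faster, O(n) vs O(n^2)).

-- ===== PORT A =====
-- inner loop 'for j in range(i-1,-1,-1): if arr[j] <= arr[i]: ans=j; break' (ans starts -1);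
-- index j is always in range, so pyGetD's default is never used
def pvInnerA (arr : List Int) (vi : Int) : List Int → Int
  | [] => -1
  | j :: rest =>
      if PySem.List.pyGetD arr j 0 ≤ vi then j else pvInnerA arr vi rest

def leftNearLessEqual2 (arr : List Int) : List Int :=
  (PySem.List.pyRange 0 (arr.length) 1).map (fun i =>
    pvInnerA arr (PySem.List.pyGetD arr i 0) (PySem.List.pyRange (i - 1) (-1) (-1)))

-- ===== PORT B =====
-- 'while stack and stack[-1][0] > v: stack.pop()' — stack top is the list head here
def pvPop (v : Int) : List (Int × Int) → List (Int × Int)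
  | [] => []
  | (x, j) :: s => if v < x then pvPop v s else (x, j) :: s

-- one iteration of B's for-loop: p = (i, v) from enumerate(arr)
def pvStepB (st : List Int × List (Int × Int)) (p : Int × Int) : List Int × List (Int × Int) :=
  let s := pvPop p.2 st.2
  (st.1 ++ [match s.head? with | some q => q.2 | none => -1], (p.2, p.1) :: s)

def leftNearLessEqual2_alt (arr : List Int) : List Int :=
  ((PySem.List.enumerate arr).foldl pvStepB ([], [])).1

-- ===== PRECONDITION & SPEC =====
def Spec_leftNearLessEqual2 (arr : List Int) (out : List Int) : Prop := out = leftNearLessEqual2_alt arr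
instance (arr : List Int) (out : List Int) : Decidable (Spec_leftNearLessEqual2 arr out) := by unfold Spec_leftNearLessEqual2; infer_instance

-- ===== CLAIM (what is proved, stated in full; the proofs are below) =====
def Claim_equal_leftNearLessEqual2 : Prop := ∀ (arr : List Int), Dom_leftNearLessEqual2 arr → Spec_leftNearLessEqual2 arr (leftNearLessEqual2 arr)

-- ===== LEMMAS AND PROOFS =====

-- value at Nat index (both ports only read in-range indices)
def pvG (arr : List Int) (j : Nat) : Int := arr.getD j 0

-- 'j is visible from i': no later value in the processed prefix is smaller
def pvP (arr : List Int) (i j : Nat) : Bool := decide (∀ k, k < i → j < k → pvG arr j ≤ pvG arr k)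

-- the specified answer for index i
def pvAns (arr : List Int) (i : Nat) : Int :=
  match (List.range i).reverse.find? (fun j => pvG arr j ≤ pvG arr i) with
  | some j => (j : Int)
  | none => -1

-- the stack contents after processing the first i elements
def pvStack (arr : List Int) (i : Nat) : List (Int × Int) :=
  ((List.range i).reverse.filter (pvP arr i)).map (fun j => (pvG arr j, (j : Int)))

theorem pvPop_sorted (v : Int) (s : List (Int × Int))
    (h : s.Pairwise (fun a b => b.1 ≤ a.1)) :
    pvPop v s = s.filter (fun p => p.1 ≤ v) := by
  induction s with
  | nil => rfl
  | cons a s ih =>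
    obtain ⟨x, j⟩ := a
    rw [List.pairwise_cons] at h
    by_cases hx : v < x
    · simp only [pvPop, if_pos hx, List.filter_cons,
        show decide ((x, j).1 ≤ v) = false by simp; omega]
      exact ih h.2
    · simp only [pvPop, if_neg hx, List.filter_cons,
        show decide ((x, j).1 ≤ v) = true by simp; omega]
      rw [List.filter_eq_self.2 (fun p hp => by
        have := h.1 p hp; simp at this ⊢; omega)]
      simp

theorem pvStack_sorted (arr : List Int) (i : Nat) :
    (pvStack arr i).Pairwise (fun a b => b.1 ≤ a.1) := by
  unfold pvStack
  rw [List.pairwise_map]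
  have h1 : ((List.range i).reverse).Pairwise (· > ·) := by
    simpa [List.pairwise_reverse] using (List.pairwise_lt_range (n := i))
  have h2 : (((List.range i).reverse).filter (pvP arr i)).Pairwise (· > ·) :=
    h1.sublist List.filter_sublist
  refine List.Pairwise.imp_of_mem (fun {a b} ha hb r => ?_) h2
  simp only [List.mem_filter, List.mem_reverse, List.mem_range] at ha hb
  have hP := of_decide_eq_true hb.2
  exact hP a ha.1 r

theorem pvP_succ (arr : List Int) (i j : Nat) (hj : j < i) :
    pvP arr (i+1) j = (pvP arr i j && decide (pvG arr j ≤ pvG arr i)) := by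
  unfold pvP
  rw [show (decide (∀ k < i, j < k → pvG arr j ≤ pvG arr k) && decide (pvG arr j ≤ pvG arr i))
      = decide ((∀ k < i, j < k → pvG arr j ≤ pvG arr k) ∧ pvG arr j ≤ pvG arr i) by simp,
    decide_eq_decide]
  constructor
  · intro H
    exact ⟨fun k hk hjk => H k (by omega) hjk, H i (by omega) hj⟩
  · intro ⟨H1, H2⟩ k hk hjk
    rcases Nat.lt_succ_iff_lt_or_eq.1 hk with h | h
    · exact H1 k h hjk
    · subst h; exact H2

theorem pvStack_filter (arr : List Int) (i : Nat) :
    (pvStack arr i).filter (fun p => p.1 ≤ pvG arr i)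
      = ((List.range i).reverse.filter
          (fun j => pvP arr i j && decide (pvG arr j ≤ pvG arr i))).map
          (fun j => (pvG arr j, (j : Int))) := by
  unfold pvStack
  rw [List.filter_map, List.filter_filter]
  congr 1
  apply List.filter_congr
  intro j _
  simp [Bool.and_comm]

theorem pvStack_succ (arr : List Int) (i : Nat) :
    pvStack arr (i+1)
      = (pvG arr i, (i : Int)) :: (pvStack arr i).filter (fun p => p.1 ≤ pvG arr i) := by
  rw [pvStack_filter]
  unfold pvStack
  rw [List.range_succ, List.reverse_append, List.reverse_singleton, List.singleton_append,
    List.filter_cons,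
    show pvP arr (i+1) i = true from decide_eq_true (fun k hk hik => by omega)]
  simp only [if_true, List.map_cons]
  congr 1
  refine congrArg _ (List.filter_congr ?_)
  intro j hj
  simp only [List.mem_reverse, List.mem_range] at hj
  exact pvP_succ arr i j hj

theorem pvFind_filter (arr : List Int) (i : Nat) (m : Nat) (hm : m ≤ i)
    (H : ∀ k, m ≤ k → k < i → pvG arr i < pvG arr k) :
    (List.range m).reverse.find? (fun j => pvG arr j ≤ pvG arr i)
      = ((List.range m).reverse.filter
          (fun j => pvP arr i j && decide (pvG arr j ≤ pvG arr i))).head? := by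
  induction m with
  | zero => rfl
  | succ m ih =>
    rw [List.range_succ, List.reverse_append, List.reverse_singleton, List.singleton_append,
      List.find?_cons, List.filter_cons]
    by_cases hle : pvG arr m ≤ pvG arr i
    · have hP : pvP arr i m = true := decide_eq_true (fun k hk hmk => by
        have := H k (by omega) hk; omega)
      simp [hle, hP]
    · have Hx : ∀ k, m ≤ k → k < i → pvG arr i < pvG arr k := by
        intro k hk1 hk2
        rcases Nat.eq_or_lt_of_le hk1 with h | h
        · subst h; omega
        · exact H k h hk2
      simp only [show decide (pvG arr m ≤ pvG arr i) = false from decide_eq_false hle,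
        Bool.and_false]
      exact ih (by omega) Hx

theorem pvAns_stack (arr : List Int) (i : Nat) :
    pvAns arr i
      = (match ((pvStack arr i).filter (fun p => p.1 ≤ pvG arr i)).head? with
         | some q => q.2 | none => -1) := by
  unfold pvAns
  rw [pvStack_filter, pvFind_filter arr i i le_rfl (fun k hk1 hk2 => by omega)]
  rw [List.head?_map]
  cases ((List.range i).reverse.filter
      (fun j => pvP arr i j && decide (pvG arr j ≤ pvG arr i))).head? <;> rfl

theorem pvInnerA_eq (arr : List Int) (i : Nat) :
    pvInnerA arr (pvG arr i) (PySem.List.pyRange ((i : Int) - 1) (-1) (-1)) = pvAns arr i := by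
  have hrange : PySem.List.pyRange ((i : Int) - 1) (-1) (-1)
      = ((List.range i).reverse).map (Nat.cast : Nat → Int) := by
    rw [PySem.List.pyRange_neg_one]
    have h1 : ((i : Int) - 1 - (-1)).toNat = i := by omega
    rw [h1]
    apply List.ext_getElem
    · simp
    · intro k h1 h2
      simp only [List.getElem_map, List.getElem_range, List.getElem_reverse,
        List.length_range]
      simp only [List.length_map, List.length_reverse, List.length_range] at h1 h2
      omega
  unfold pvAns
  rw [hrange]
  generalize (List.range i).reverse = L
  induction L with
  | nil => rfl
  | cons j L ih =>
    simp only [List.map_cons, List.find?_cons]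
    unfold pvInnerA
    rw [PySem.List.pyGetD_natCast]
    by_cases hle : arr.getD j 0 ≤ pvG arr i
    · simp only [if_pos hle, show decide (pvG arr j ≤ pvG arr i) = true from decide_eq_true hle]
    · simp only [if_neg hle, show decide (pvG arr j ≤ pvG arr i) = false from decide_eq_false hle]
      exact ih

theorem pvFold_inv (arr : List Int) (pre : Nat) (h : pre ≤ arr.length) :
    ((PySem.List.enumerate arr).take pre).foldl pvStepB ([], [])
      = ((List.range pre).map (pvAns arr), pvStack arr pre) := by
  induction pre with
  | zero => rfl
  | succ pre ih =>
    have hpre : pre < arr.length := by omega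
    have hget : (PySem.List.enumerate arr)[pre]? = some ((pre : Int), arr[pre]) := by
      rw [PySem.List.getElem?_enumerate]
      simp [List.getElem?_eq_getElem hpre]
    rw [List.take_add_one, hget, Option.toList_some, List.foldl_append, ih (by omega)]
    have hval : arr[pre] = pvG arr pre := (List.getD_eq_getElem arr 0 hpre).symm
    simp only [List.foldl_cons, List.foldl_nil]
    unfold pvStepB
    simp only [hval]
    rw [pvPop_sorted _ _ (pvStack_sorted arr pre)]
    rw [← pvStack_succ]
    rw [← pvAns_stack]
    rw [List.range_succ, List.map_append, List.map_singleton]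

-- ===== VERDICT (by name: the statement is the Claim_ definition above) =====
theorem leftNearLessEqual2_spec : Claim_equal_leftNearLessEqual2 := by
  intro arr _
  unfold Spec_leftNearLessEqual2 leftNearLessEqual2 leftNearLessEqual2_alt
  have halt : ((PySem.List.enumerate arr).foldl pvStepB ([], [])).1
      = (List.range arr.length).map (pvAns arr) := by
    have := pvFold_inv arr arr.length le_rfl
    rw [List.take_of_length_le (by rw [PySem.List.length_enumerate])] at this
    rw [this]
  rw [halt, PySem.List.pyRange_zero_nat, List.map_map]
  apply List.map_congr_left
  intro k hk
  simp only [List.mem_range] at hk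
  simp only [Function.comp]
  rw [PySem.List.pyGetD_natCast]
  exact pvInnerA_eq arr k
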